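-- pv_equiv track=rewrite | github.com/pc5401/my_BOJ | 백준/Bronze/9724. Perfect Cube/Perfect Cube.py | solve
-- ===== SOURCE A (Python) =====
-- def search(n: int) -> int:
--     lo, hi = 0, 1259
--     while lo <= hi:
--         mid = (lo + hi) // 2
--         m3 = mid * mid * mid
--         if m3 == n:
--             return mid
--         if m3 < n:
--             lo = mid + 1
--         else:
--             hi = mid - 1
--     return hi
--
-- def solve(cases):
--     out = []
--     for i, (A, B) in enumerate(cases, 1):
--         fb = search(B)
--         fa = search(A)
--         ca = fa if fa * fa * fa == A else fa + 1
--         cnt = fb - ca + 1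
--         if cnt < 0:
--             cnt = 0
--         out.append(f"Case #{i}: {cnt}")
--     return out
-- ===== SOURCE B (Python) =====
-- def solve(cases):
--     cubes = [k * k * k for k in range(1260)]
--     out = []
--     for i, (a, b) in enumerate(cases, 1):
--         cnt = 0
--         for c in cubes:
--             if a <= c <= b:
--                 cnt += 1
--         out.append(f"Case #{i}: {cnt}")
--     return out
-- ===== Notes on version B (the rewrite author's own statement) =====
-- stated objective: simpler
-- what changed: Replaces the binary-search cube-root helper (and its round-up/clamp arithmetic) with a direct linear count over the 1260 precomputed candidate cubes for each case.
-- outside the precondition, e.g. on solve([(-1, 8)]): A returns ['Case #1: 4'], B returns ['Case #1: 3']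
import Mathlib
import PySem

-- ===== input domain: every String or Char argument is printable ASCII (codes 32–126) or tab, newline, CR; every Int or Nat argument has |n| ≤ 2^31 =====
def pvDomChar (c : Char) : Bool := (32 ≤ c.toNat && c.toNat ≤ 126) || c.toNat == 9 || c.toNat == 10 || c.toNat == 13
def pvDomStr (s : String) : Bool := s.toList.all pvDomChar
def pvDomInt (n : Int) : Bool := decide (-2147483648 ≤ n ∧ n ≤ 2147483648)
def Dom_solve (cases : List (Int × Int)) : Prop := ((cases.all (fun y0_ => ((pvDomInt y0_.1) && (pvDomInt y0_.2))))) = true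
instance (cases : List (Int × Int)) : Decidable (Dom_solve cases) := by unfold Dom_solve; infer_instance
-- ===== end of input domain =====

-- B drops A's binary-search cube-root helper and counts the 1260 candidate cubes directly (simpler; same asymptotic cost per case).

-- ===== PORT A =====
-- the 'while lo <= hi' loop of search, made total with fuel (never exhausted: the interval shrinks each step)
def searchLoop (n : Int) : Nat → Int → Int → Int
  | 0, _, hi => hi
  | fuel + 1, lo, hi =>
    if lo ≤ hi then
      let mid := PySem.Int.floordiv (lo + hi) 2
      let m3 := mid * mid * mid
      if m3 = n then mid
      else if m3 < n then searchLoop n fuel (mid + 1) hi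
      else searchLoop n fuel lo (mid - 1)
    else hi

def search (n : Int) : Int := searchLoop n 1260 0 1259

def solveGo (i : Int) : List (Int × Int) → List String
  | [] => []
  | (A, B) :: rest =>
    let fb := search B
    let fa := search A
    let ca := if fa * fa * fa = A then fa else fa + 1
    let cnt0 := fb - ca + 1
    let cnt := if cnt0 < 0 then 0 else cnt0
    ("Case #" ++ PySem.Int.toStr i ++ ": " ++ PySem.Int.toStr cnt) :: solveGo (i + 1) rest

def solve (cases : List (Int × Int)) : List String := solveGo 1 cases

-- ===== PORT B =====
def cubesB : List Int := (PySem.List.pyRange 0 1260 1).map (fun k => k * k * k)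

def countCubes (a b : Int) : Int :=
  cubesB.foldl (fun acc c => if a ≤ c ∧ c ≤ b then acc + 1 else acc) 0

def solveAltGo (i : Int) : List (Int × Int) → List String
  | [] => []
  | (a, b) :: rest =>
    ("Case #" ++ PySem.Int.toStr i ++ ": " ++ PySem.Int.toStr (countCubes a b)) :: solveAltGo (i + 1) rest

def solve_alt (cases : List (Int × Int)) : List String := solveAltGo 1 cases

-- ===== PRECONDITION & SPEC =====
-- Pre_ excludes lists containing a case whose lower bound is exactly -1 — outside the problem's
-- stated domain (1 ≤ A ≤ B), the one corner where A's binary search accidentally counts the single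
-- negative cube -1 (the only negative cube A ever counts; for lower bound -8 it misses -8 and -1),
-- while B uniformly counts the nonnegative candidate cubes 0^3..1259^3 on such unspecified input.
def Pre_solve (cases : List (Int × Int)) : Prop := ∀ p ∈ cases, p.1 ≠ -1
instance (cases : List (Int × Int)) : Decidable (Pre_solve cases) := by unfold Pre_solve; infer_instance

def pvWitness_solve : (List (Int × Int)) := [(1, 27), (-5, 100)]

def Spec_solve (cases : List (Int × Int)) (out : List String) : Prop := out = solve_alt cases
instance (cases : List (Int × Int)) (out : List String) : Decidable (Spec_solve cases out) := by unfold Spec_solve; infer_instance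

-- ===== CLAIM (what is proved, stated in full; the proofs are below) =====
def Claim_equal_solve : Prop := ∀ (cases : List (Int × Int)), Dom_solve cases → Pre_solve cases → Spec_solve cases (solve cases)

-- ===== LEMMAS AND PROOFS =====

theorem cube_le_cube {x y : Int} (hx : 0 ≤ x) (h : x ≤ y) : x * x * x ≤ y * y * y := by
  have hy : 0 ≤ y := hx.trans h
  have h2 : x * x ≤ y * y := mul_le_mul h h hx hy
  exact mul_le_mul h2 h hx (mul_nonneg hy hy)

theorem cube_lt_cube {x y : Int} (hx : 0 ≤ x) (h : x < y) : x * x * x < y * y * y := by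
  nlinarith [cube_le_cube hx (by omega : x ≤ y - 1)]

theorem searchLoop_spec (n : Int) : ∀ (fuel : Nat) (lo hi : Int),
    (hi + 1 - lo).toNat ≤ fuel → 0 ≤ lo → hi ≤ 1259 → lo ≤ hi + 1 →
    (0 < lo → (lo - 1) * (lo - 1) * (lo - 1) ≤ n) →
    (hi < 1259 → n < (hi + 1) * (hi + 1) * (hi + 1)) →
    -1 ≤ searchLoop n fuel lo hi ∧ searchLoop n fuel lo hi ≤ 1259 ∧
    (0 ≤ searchLoop n fuel lo hi →
      searchLoop n fuel lo hi * searchLoop n fuel lo hi * searchLoop n fuel lo hi ≤ n) ∧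
    (searchLoop n fuel lo hi < 1259 →
      n < (searchLoop n fuel lo hi + 1) * (searchLoop n fuel lo hi + 1) * (searchLoop n fuel lo hi + 1)) := by
  intro fuel
  induction fuel with
  | zero =>
    intro lo hi hf hlo hhi hlh hL hH
    have hlo' : lo = hi + 1 := by omega
    subst hlo'
    simp only [searchLoop]
    refine ⟨by omega, hhi, ?_, hH⟩
    intro hr
    have := hL (by omega)
    simpa using this
  | succ fuel ih =>
    intro lo hi hf hlo hhi hlh hL hH
    simp only [searchLoop]
    by_cases hle : lo ≤ hi
    · simp only [hle, if_true]
      have hmid := PySem.Int.floordiv_two_mid_bounds hle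
      set mid := PySem.Int.floordiv (lo + hi) 2 with hmiddef
      obtain ⟨hm1, hm2⟩ := hmid
      by_cases heq : mid * mid * mid = n
      · simp only [heq, if_true]
        refine ⟨by omega, by omega, fun _ => le_rfl, fun _ => ?_⟩
        have : mid * mid * mid < (mid + 1) * (mid + 1) * (mid + 1) :=
          cube_lt_cube (by omega) (by omega)
        omega
      · simp only [heq, if_false]
        by_cases hlt : mid * mid * mid < n
        · simp only [hlt, if_true]
          exact ih (mid + 1) hi (by omega) (by omega) hhi (by omega)
            (fun _ => by simpa using le_of_lt hlt) hH
        · simp only [hlt, if_false]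
          refine ih lo (mid - 1) (by omega) hlo (by omega) (by omega) hL (fun _ => ?_)
          have : n < mid * mid * mid := by omega
          simpa using this
    · simp only [hle, if_false]
      have hlo' : lo = hi + 1 := by omega
      subst hlo'
      refine ⟨by omega, hhi, ?_, hH⟩
      intro hr
      have := hL (by omega)
      simpa using this

theorem search_spec (n : Int) :
    -1 ≤ search n ∧ search n ≤ 1259 ∧
    (0 ≤ search n → search n * search n * search n ≤ n) ∧
    (search n < 1259 → n < (search n + 1) * (search n + 1) * (search n + 1)) := by
  unfold search
  exact searchLoop_spec n 1260 0 1259 (by norm_num) (by norm_num) (by norm_num) (by norm_num)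
    (by omega) (by omega)

theorem count_range (c d : Int) (hc : 0 ≤ c) : ∀ (N : Nat),
    (PySem.List.pyRange 0 (N : Int) 1).foldl
      (fun acc k => if c ≤ k ∧ k ≤ d then acc + 1 else acc) 0
      = max 0 (min d ((N : Int) - 1) - c + 1) := by
  intro N
  induction N with
  | zero =>
    rw [PySem.List.pyRange_one_eq_nil (by norm_num)]
    simp only [List.foldl_nil]
    omega
  | succ N ih =>
    have hcast : ((N + 1 : Nat) : Int) = (N : Int) + 1 := by push_cast; ring
    rw [hcast, PySem.List.pyRange_one_succ_right (by positivity), List.foldl_append]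
    simp only [List.foldl_cons, List.foldl_nil]
    rw [ih]
    by_cases h : c ≤ (N : Int) ∧ (N : Int) ≤ d
    · rw [if_pos h]
      obtain ⟨h1, h2⟩ := h
      omega
    · rw [if_neg h]
      rw [not_and_or] at h
      rcases h with h | h <;> omega

theorem countCubes_eq (a b : Int) (ha : a ≠ -1) :
    countCubes a b =
      (if search b - (if search a * search a * search a = a then search a else search a + 1) + 1 < 0
       then 0
       else search b - (if search a * search a * search a = a then search a else search a + 1) + 1) := by
  obtain ⟨hb1, hb2, hb3, hb4⟩ := search_spec b
  obtain ⟨ha1, ha2, ha3, ha4⟩ := search_spec a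
  set fb := search b with hfbdef
  set fa := search a with hfadef
  set ca : Int := if fa * fa * fa = a then fa else fa + 1 with hcadef
  have hca0 : 0 ≤ ca := by
    by_cases hneg : a < 0
    · have hfam : fa = -1 := by
        rcases lt_or_ge fa 0 with h | h
        · omega
        · exact absurd (ha3 h) (by nlinarith)
      have : ¬ (fa * fa * fa = a) := by rw [hfam]; intro hcon; apply ha; omega
      rw [hcadef, if_neg this, hfam]
      omega
    · have hfa0 : 0 ≤ fa := by
        rcases lt_or_ge fa 0 with h | h
        · have hfam : fa = -1 := by omega
          have := ha4 (by omega)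
          rw [hfam] at this
          norm_num at this
          omega
        · exact h
      rw [hcadef]; split <;> omega
  have hpoint : ∀ k : Int, 0 ≤ k → k < 1260 →
      ((a ≤ k * k * k ∧ k * k * k ≤ b) ↔ (ca ≤ k ∧ k ≤ fb)) := by
    intro k hk0 hk1
    have hright : k * k * k ≤ b ↔ k ≤ fb := by
      constructor
      · intro hkb
        by_contra hcon
        push_neg at hcon
        have hfblt : fb < 1259 := by omega
        have := hb4 hfblt
        have : (fb + 1) * (fb + 1) * (fb + 1) ≤ k * k * k :=
          cube_le_cube (by omega) (by omega)
        omega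
      · intro hkfb
        have hfb0 : 0 ≤ fb := by omega
        have h1 := hb3 hfb0
        have h2 : k * k * k ≤ fb * fb * fb := cube_le_cube hk0 hkfb
        omega
    have hleft : a ≤ k * k * k ↔ ca ≤ k := by
      by_cases hneg : a < 0
      · have hfam : fa = -1 := by
          rcases lt_or_ge fa 0 with h | h
          · omega
          · exact absurd (ha3 h) (by nlinarith)
        have hne : ¬ (fa * fa * fa = a) := by rw [hfam]; intro hcon; apply ha; omega
        have hca : ca = 0 := by rw [hcadef, if_neg hne, hfam]; ring
        rw [hca]
        constructor
        · intro _; exact hk0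
        · intro _; nlinarith
      · push_neg at hneg
        have hfa0 : 0 ≤ fa := by
          rcases lt_or_ge fa 0 with h | h
          · have hfam : fa = -1 := by omega
            have := ha4 (by omega)
            rw [hfam] at this
            norm_num at this
            omega
          · exact h
        have hfa3 := ha3 hfa0
        by_cases heq : fa * fa * fa = a
        · have hca : ca = fa := by rw [hcadef, if_pos heq]
          rw [hca]
          constructor
          · intro hak
            by_contra hcon
            push_neg at hcon
            have : k * k * k < fa * fa * fa := cube_lt_cube hk0 hcon
            omega
          · intro hfak
            have : fa * fa * fa ≤ k * k * k := cube_le_cube hfa0 hfak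
            omega
        · have hca : ca = fa + 1 := by rw [hcadef, if_neg heq]
          rw [hca]
          constructor
          · intro hak
            by_contra hcon
            push_neg at hcon
            have : k * k * k ≤ fa * fa * fa := cube_le_cube hk0 (by omega)
            omega
          · intro hfak
            rcases lt_or_ge fa 1259 with h | h
            · have := ha4 h
              have h2 : (fa + 1) * (fa + 1) * (fa + 1) ≤ k * k * k :=
                cube_le_cube (by omega) hfak
              omega
            · omega
    constructor
    · rintro ⟨h1, h2⟩; exact ⟨(hleft.mp h1), (hright.mp h2)⟩
    · rintro ⟨h1, h2⟩; exact ⟨(hleft.mpr h1), (hright.mpr h2)⟩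
  unfold countCubes cubesB
  rw [List.foldl_map]
  have hcong : (PySem.List.pyRange 0 1260 1).foldl
      (fun acc k => if a ≤ k * k * k ∧ k * k * k ≤ b then acc + 1 else acc) (0 : Int)
      = (PySem.List.pyRange 0 1260 1).foldl
      (fun acc k => if ca ≤ k ∧ k ≤ fb then acc + 1 else acc) (0 : Int) := by
    refine PySem.List.foldl_congr_mem _ _ _ _ ?_
    intro acc k hk
    rw [PySem.List.mem_pyRange_one] at hk
    exact if_congr (hpoint k hk.1 hk.2) rfl rfl
  rw [hcong]
  have h1260 : ((1260 : Nat) : Int) = (1260 : Int) := by norm_num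
  rw [← h1260, count_range ca fb hca0 1260]
  rw [h1260]
  split_ifs with hsp <;> omega

theorem solveGo_eq (cs : List (Int × Int)) : ∀ i : Int,
    (∀ p ∈ cs, p.1 ≠ -1) → solveGo i cs = solveAltGo i cs := by
  induction cs with
  | nil => intro i _; rfl
  | cons hd tl ih =>
    intro i hall
    obtain ⟨a, b⟩ := hd
    have ha : a ≠ -1 := hall (a, b) (List.mem_cons_self)
    simp only [solveGo, solveAltGo]
    refine List.cons_eq_cons.mpr ⟨?_, ih (i + 1) (fun p hp => hall p (List.mem_cons_of_mem _ hp))⟩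
    rw [countCubes_eq a b ha]

-- ===== VERDICT (by name: the statement is the Claim_ definition above) =====
theorem solve_spec : Claim_equal_solve := by
  intro cases _ hpre
  unfold Spec_solve solve solve_alt
  exact solveGo_eq cases 1 hpre
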